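-- pv_equiv track=rewrite | github.com/jorsae/RiChess | src/model/parser/fen_parser.py | parse_castling
-- ===== SOURCE A (Python) =====
-- def parse_castling(castling):
--     def remove_has_moved(has_moved, value):
--         try:
--             has_moved.remove(value)
--         except ValueError:
--             pass
--
--     has_moved = [(0, 0), (4, 0), (7, 0), (0, 7), (4, 7), (7, 7)]
--     if castling == '-':
--         return has_moved
--
--     for char in castling:
--         char_lower = char.lower()
--         if char_lower == 'k':
--             if char.isupper():
--                 remove_has_moved(has_moved, (4, 7))
--                 remove_has_moved(has_moved, (7, 7))
--             else:
--                 remove_has_moved(has_moved, (4, 0))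
--                 remove_has_moved(has_moved, (7, 0))
--         elif char_lower == 'q':
--             if char.isupper():
--                 remove_has_moved(has_moved, (0, 7))
--                 remove_has_moved(has_moved, (4, 7))
--             else:
--                 remove_has_moved(has_moved, (0, 0))
--                 remove_has_moved(has_moved, (4, 0))
--
--     return has_moved
-- ===== SOURCE B (Python) =====
-- def parse_castling(castling):
--     clears = {'K': {(4, 7), (7, 7)}, 'Q': {(0, 7), (4, 7)},
--               'k': {(4, 0), (7, 0)}, 'q': {(0, 0), (4, 0)}}
--     cleared = set()
--     for ch in castling:
--         cleared |= clears.get(ch, set())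
--     full = [(0, 0), (4, 0), (7, 0), (0, 7), (4, 7), (7, 7)]
--     return [sq for sq in full if sq not in cleared]
-- ===== Notes on version B (the rewrite author's own statement) =====
-- stated objective: simpler
-- what changed: Replaces A's in-place repeated list.remove with a wrapped-exception helper and an early-return special case by a collect-then-filter decomposition: a dict maps each castling char to the squares it clears, one pass unions them into a set, and a single comprehension filters the fixed 6-square list.
import Mathlib
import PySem

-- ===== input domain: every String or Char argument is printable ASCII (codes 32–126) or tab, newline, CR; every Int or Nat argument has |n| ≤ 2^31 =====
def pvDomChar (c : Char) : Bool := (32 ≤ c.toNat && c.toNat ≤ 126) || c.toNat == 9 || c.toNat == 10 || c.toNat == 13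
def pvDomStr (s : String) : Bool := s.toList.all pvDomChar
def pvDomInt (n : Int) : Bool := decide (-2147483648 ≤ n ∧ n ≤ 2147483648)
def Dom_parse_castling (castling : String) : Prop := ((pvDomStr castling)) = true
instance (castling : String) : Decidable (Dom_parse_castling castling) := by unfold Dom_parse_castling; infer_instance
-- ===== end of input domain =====

-- B replaces A's in-place repeated list.remove (with a wrapped-exception helper and an early-return special
-- case) by a collect-then-filter decomposition: simpler, same cost.

-- ===== PORT A =====
-- inner helper remove_has_moved: try remove, pass on ValueError
def removeHasMoved (hm : List (Int × Int)) (v : Int × Int) : List (Int × Int) :=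
  match PySem.List.remove? hm v with
  | some l => l
  | none => hm

def pvStepA (hm : List (Int × Int)) (c : Char) : List (Int × Int) :=
  let char_lower := PySem.Chars.lowerChar c
  if char_lower = 'k' then
    if PySem.Chars.isupper c then
      removeHasMoved (removeHasMoved hm (4, 7)) (7, 7)
    else
      removeHasMoved (removeHasMoved hm (4, 0)) (7, 0)
  else if char_lower = 'q' then
    if PySem.Chars.isupper c then
      removeHasMoved (removeHasMoved hm (0, 7)) (4, 7)
    else
      removeHasMoved (removeHasMoved hm (0, 0)) (4, 0)
  else hm

def parse_castling (castling : String) : List (Int × Int) :=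
  let has_moved : List (Int × Int) := [(0, 0), (4, 0), (7, 0), (0, 7), (4, 7), (7, 7)]
  if castling = "-" then has_moved
  else castling.toList.foldl pvStepA has_moved

-- ===== PORT B =====
def pvClears : PySem.Dict Char (PySem.Set (Int × Int)) :=
  PySem.Dict.ofList
    [('K', PySem.Set.ofList [(4, 7), (7, 7)]), ('Q', PySem.Set.ofList [(0, 7), (4, 7)]),
     ('k', PySem.Set.ofList [(4, 0), (7, 0)]), ('q', PySem.Set.ofList [(0, 0), (4, 0)])]

def pvStepB (s : PySem.Set (Int × Int)) (c : Char) : PySem.Set (Int × Int) :=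
  PySem.Set.union s (pvClears.getD c PySem.Set.empty)

def parse_castling_alt (castling : String) : List (Int × Int) :=
  let cleared := castling.toList.foldl pvStepB PySem.Set.empty
  let full : List (Int × Int) := [(0, 0), (4, 0), (7, 0), (0, 7), (4, 7), (7, 7)]
  full.filter (fun sq => !(PySem.Set.contains cleared sq))

-- ===== PRECONDITION & SPEC =====
def Spec_parse_castling (castling : String) (out : List (Int × Int)) : Prop := out = parse_castling_alt castling
instance (castling : String) (out : List (Int × Int)) : Decidable (Spec_parse_castling castling out) := by unfold Spec_parse_castling; infer_instance

-- ===== CLAIM (what is proved, stated in full; the proofs are below) =====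
def Claim_equal_parse_castling : Prop := ∀ (castling : String), Dom_parse_castling castling → Spec_parse_castling castling (parse_castling castling)

-- ===== LEMMAS AND PROOFS =====

def pvFull : List (Int × Int) := [(0, 0), (4, 0), (7, 0), (0, 7), (4, 7), (7, 7)]

lemma pv_filter_ne_of_not_mem {p : Int × Int → Bool} {l : List (Int × Int)} {v : Int × Int}
    (h : v ∉ l) : l.filter (fun x => p x && !(x == v)) = l.filter p := by
  apply List.filter_congr
  intro x hx
  have hxv : x ≠ v := fun he => h (he ▸ hx)
  simp [hxv]

-- removing v from a filtered duplicate-free list = filtering with the extra exclusion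
lemma pv_removeHM_filter (p : Int × Int → Bool) (base : List (Int × Int)) (hnd : base.Nodup)
    (v : Int × Int) :
    removeHasMoved (base.filter p) v = base.filter (fun x => p x && !(x == v)) := by
  induction base with
  | nil => rfl
  | cons a l ih =>
    rw [List.nodup_cons] at hnd
    obtain ⟨hal, hl⟩ := hnd
    by_cases hpa : p a = true
    · by_cases hav : a = v
      · subst hav
        simp only [List.filter_cons, hpa, if_pos]
        simp only [removeHasMoved, PySem.List.remove?_cons_self]
        rw [pv_filter_ne_of_not_mem hal]
        simp [hpa]
      · simp only [List.filter_cons, hpa, if_pos]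
        have hstep : removeHasMoved (a :: l.filter p) v = a :: removeHasMoved (l.filter p) v := by
          simp only [removeHasMoved, PySem.List.remove?_cons_of_ne _ hav]
          cases PySem.List.remove? (l.filter p) v <;> rfl
        rw [hstep, ih hl]
        simp [hpa, hav]
    · simp only [List.filter_cons, hpa, Bool.false_and, Bool.false_eq_true, if_false]
      exact ih hl

lemma pv_full_nodup : pvFull.Nodup := by decide

lemma pv_char_eq_of_toNat {a b : Char} (h : a.toNat = b.toNat) : a = b :=
  Char.ext (UInt32.toNat_inj.mp h)

lemma pv_isupper_bounds {c : Char} (h : PySem.Chars.isupper c = true) :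
    65 ≤ c.toNat ∧ c.toNat ≤ 90 := by
  simp only [PySem.Chars.isupper, Bool.and_eq_true, decide_eq_true_eq, Char.le_def] at h
  exact ⟨UInt32.le_iff_toNat_le.mp h.1, UInt32.le_iff_toNat_le.mp h.2⟩

-- lowerChar c = 'k' only for c = 'k' or c = 'K' (any Char)
lemma pv_lowerChar_k {c : Char} (h : PySem.Chars.lowerChar c = 'k') : c = 'k' ∨ c = 'K' := by
  by_cases hc : PySem.Chars.isupper c = true
  · right
    simp only [PySem.Chars.lowerChar, hc, if_pos] at h
    obtain ⟨h65, h90⟩ := pv_isupper_bounds hc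
    have hn : c.toNat = 75 := by
      set n := c.toNat with hn
      interval_cases n <;> revert h <;> decide
    exact pv_char_eq_of_toNat (by rw [hn]; rfl)
  · left
    simp only [PySem.Chars.lowerChar, hc] at h
    exact h

-- lowerChar c = 'q' only for c = 'q' or c = 'Q' (any Char)
lemma pv_lowerChar_q {c : Char} (h : PySem.Chars.lowerChar c = 'q') : c = 'q' ∨ c = 'Q' := by
  by_cases hc : PySem.Chars.isupper c = true
  · right
    simp only [PySem.Chars.lowerChar, hc, if_pos] at h
    obtain ⟨h65, h90⟩ := pv_isupper_bounds hc
    have hn : c.toNat = 81 := by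
      set n := c.toNat with hn
      interval_cases n <;> revert h <;> decide
    exact pv_char_eq_of_toNat (by rw [hn]; rfl)
  · left
    simp only [PySem.Chars.lowerChar, hc] at h
    exact h

lemma pv_union_empty (s : PySem.Set (Int × Int)) : PySem.Set.union s PySem.Set.empty = s := rfl

-- the pointwise boolean identity behind one flag character
lemma pv_filter_union_two (s : PySem.Set (Int × Int)) (u v x : Int × Int) :
    ((!PySem.Set.contains s x && !(x == u)) && !(x == v))
      = !(PySem.Set.contains (PySem.Set.union s (PySem.Set.ofList [u, v])) x) := by
  simp only [PySem.Set.contains]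
  rw [Bool.eq_iff_iff]
  simp only [Bool.and_eq_true, Bool.not_eq_eq_eq_not, Bool.not_true, beq_eq_false_iff_ne, ne_eq, List.contains_eq_mem, decide_eq_false_iff_not,
    PySem.Set.mem_union, PySem.Set.mem_ofList]
  constructor
  · rintro ⟨⟨h1, h2⟩, h3⟩ (h | h) <;> simp_all
  · intro h
    refine ⟨⟨fun hm => h (Or.inl hm), ?_⟩, ?_⟩ <;> intro he <;> exact h (Or.inr (by simp [he]))

lemma pv_flag_step (s : PySem.Set (Int × Int)) (u v : Int × Int) :
    removeHasMoved (removeHasMoved (pvFull.filter (fun sq => !(PySem.Set.contains s sq))) u) v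
      = pvFull.filter (fun sq => !(PySem.Set.contains (PySem.Set.union s (PySem.Set.ofList [u, v])) sq)) := by
  rw [pv_removeHM_filter _ _ pv_full_nodup, pv_removeHM_filter _ _ pv_full_nodup]
  exact List.filter_congr fun x _ => pv_filter_union_two s u v x

lemma pv_dict_other {c : Char} (hK : c ≠ 'K') (hk : c ≠ 'k') (hQ : c ≠ 'Q') (hq : c ≠ 'q') :
    pvClears.getD c PySem.Set.empty = PySem.Set.empty := by
  have hnone : pvClears.get? c = none := by
    rw [PySem.Dict.get?_eq_none_iff_not_mem_keys]
    intro hmem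
    have hkeys : pvClears.keys = ['K', 'Q', 'k', 'q'] := by decide
    rw [hkeys] at hmem
    simp at hmem
    tauto
  simp [PySem.Dict.getD, hnone]

-- one A-step on the filtered list = the filter through one B-step
lemma pv_step_eq (s : PySem.Set (Int × Int)) (c : Char) :
    pvStepA (pvFull.filter (fun sq => !(PySem.Set.contains s sq))) c
      = pvFull.filter (fun sq => !(PySem.Set.contains (pvStepB s c) sq)) := by
  by_cases hkl : PySem.Chars.lowerChar c = 'k'
  · rcases pv_lowerChar_k hkl with hc | hc
    · subst hc
      have hA : ∀ hm, pvStepA hm 'k' = removeHasMoved (removeHasMoved hm (4, 0)) (7, 0) :=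
        fun hm => rfl
      have hB : pvStepB s 'k' = PySem.Set.union s (PySem.Set.ofList [(4, 0), (7, 0)]) := rfl
      rw [hA, hB]
      exact pv_flag_step s (4, 0) (7, 0)
    · subst hc
      have hA : ∀ hm, pvStepA hm 'K' = removeHasMoved (removeHasMoved hm (4, 7)) (7, 7) :=
        fun hm => rfl
      have hB : pvStepB s 'K' = PySem.Set.union s (PySem.Set.ofList [(4, 7), (7, 7)]) := rfl
      rw [hA, hB]
      exact pv_flag_step s (4, 7) (7, 7)
  · by_cases hql : PySem.Chars.lowerChar c = 'q'
    · rcases pv_lowerChar_q hql with hc | hc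
      · subst hc
        have hA : ∀ hm, pvStepA hm 'q' = removeHasMoved (removeHasMoved hm (0, 0)) (4, 0) :=
          fun hm => rfl
        have hB : pvStepB s 'q' = PySem.Set.union s (PySem.Set.ofList [(0, 0), (4, 0)]) := rfl
        rw [hA, hB]
        exact pv_flag_step s (0, 0) (4, 0)
      · subst hc
        have hA : ∀ hm, pvStepA hm 'Q' = removeHasMoved (removeHasMoved hm (0, 7)) (4, 7) :=
          fun hm => rfl
        have hB : pvStepB s 'Q' = PySem.Set.union s (PySem.Set.ofList [(0, 7), (4, 7)]) := rfl
        rw [hA, hB]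
        exact pv_flag_step s (0, 7) (4, 7)
    · have hK : c ≠ 'K' := by rintro rfl; exact hkl (by decide)
      have hk : c ≠ 'k' := by rintro rfl; exact hkl (by decide)
      have hQ : c ≠ 'Q' := by rintro rfl; exact hql (by decide)
      have hq : c ≠ 'q' := by rintro rfl; exact hql (by decide)
      simp only [pvStepA, pvStepB, if_neg hkl, if_neg hql, pv_dict_other hK hk hQ hq,
        pv_union_empty]

lemma pv_loop_eq (cs : List Char) : ∀ s : PySem.Set (Int × Int),
    cs.foldl pvStepA (pvFull.filter (fun sq => !(PySem.Set.contains s sq)))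
      = pvFull.filter (fun sq => !(PySem.Set.contains (cs.foldl pvStepB s) sq)) := by
  induction cs with
  | nil => intro s; rfl
  | cons c cs ih =>
    intro s
    simp only [List.foldl_cons, pv_step_eq s c]
    exact ih (pvStepB s c)

lemma pv_filter_empty :
    pvFull.filter (fun sq => !(PySem.Set.contains PySem.Set.empty sq)) = pvFull := by decide

-- ===== VERDICT (by name: the statement is the Claim_ definition above) =====
theorem parse_castling_spec : Claim_equal_parse_castling := by
  intro castling _
  unfold Spec_parse_castling parse_castling parse_castling_alt
  by_cases hdash : castling = "-"
  · subst hdash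
    decide
  · rw [if_neg hdash]
    have := pv_loop_eq castling.toList PySem.Set.empty
    rw [pv_filter_empty] at this
    exact this
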